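-- pv_equiv track=rewrite | github.com/LucaCappelletti94/dictances | dictances/hamming.py | hamming
-- ===== SOURCE A (Python) =====
-- from typing import Dict
--
-- def hamming(a: Dict, b: Dict)->float:
--     """Return the Hamming distance beetween the given dictionaries.
--
--     Parameters
--     ----------------------------
--     a: Dict,
--         First dictionary to consider.
--     b: Dict,
--         Second dictionary to consider.
--
--     Returns
--     ----------------------------
--     Return the Hamming distance beetween the given dictionaries.
--     """
--     common = 0
--     bget = b.__getitem__
--     for k in a:
--         try:
--             bget(k)
--             common += 1
--         except KeyError:
--             pass
--     return len(a) + len(b) - common * 2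
-- ===== SOURCE B (Python) =====
-- def hamming(a, b):
--     """Return the Hamming distance beetween the given dictionaries.
--
--     Parameters
--     ----------------------------
--     a: Dict,
--         First dictionary to consider.
--     b: Dict,
--         Second dictionary to consider.
--
--     Returns
--     ----------------------------
--     Return the Hamming distance beetween the given dictionaries.
--     """
--     return len(a.keys() ^ b.keys())
-- ===== Notes on version B (the rewrite author's own statement) =====
-- stated objective: simpler
-- what changed: Replaces the explicit loop with try/except lookup and the intersection counter by a single set operation: the distance is the size of the symmetric difference of the two key sets (|A|+|B|-2|A∩B| = |A△B|).
import Mathlib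
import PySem

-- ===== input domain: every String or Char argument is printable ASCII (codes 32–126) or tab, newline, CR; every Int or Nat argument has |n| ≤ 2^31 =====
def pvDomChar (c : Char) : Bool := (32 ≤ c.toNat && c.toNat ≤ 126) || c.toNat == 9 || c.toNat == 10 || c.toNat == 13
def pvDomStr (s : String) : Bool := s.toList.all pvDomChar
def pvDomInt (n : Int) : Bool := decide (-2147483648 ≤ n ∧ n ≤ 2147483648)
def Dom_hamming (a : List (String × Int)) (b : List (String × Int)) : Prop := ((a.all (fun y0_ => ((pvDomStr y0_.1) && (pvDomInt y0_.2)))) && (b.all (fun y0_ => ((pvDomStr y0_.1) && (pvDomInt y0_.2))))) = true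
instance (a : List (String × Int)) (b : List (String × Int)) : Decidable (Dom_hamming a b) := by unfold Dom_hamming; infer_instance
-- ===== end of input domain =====

-- B replaces A's key loop + try/except intersection counter by one set operation:
-- the size of the symmetric difference of the two key sets (same cost, simpler).

-- ===== PORT A =====
-- for k in a: try b[k]; common += 1; except KeyError: pass — then len(a)+len(b)-2*common
def hamming (a : List (String × Int)) (b : List (String × Int)) : Int :=
  let bd : PySem.Dict String Int := PySem.Dict.mk b
  let common : Int := (PySem.Dict.mk a).keys.foldl
    (fun c k =>
      match bd.get? k with
      | some _ => c + 1
      | none => c) 0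
  (a.length : Int) + (b.length : Int) - common * 2

-- ===== PORT B =====
-- len(a.keys() ^ b.keys())
def hamming_alt (a : List (String × Int)) (b : List (String × Int)) : Int :=
  ((PySem.Set.symmDiff (PySem.Set.ofList (PySem.Dict.mk a).keys)
      (PySem.Set.ofList (PySem.Dict.mk b).keys)).length : Int)

-- ===== PRECONDITION & SPEC =====
-- Pre_ states the Python dict invariant: the association lists carry distinct keys
-- (a Python dict can never present duplicate keys, so this excludes no Python input).
def Pre_hamming (a : List (String × Int)) (b : List (String × Int)) : Prop :=
  (a.map Prod.fst).Nodup ∧ (b.map Prod.fst).Nodup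
instance (a : List (String × Int)) (b : List (String × Int)) : Decidable (Pre_hamming a b) := by unfold Pre_hamming; infer_instance
def pvWitness_hamming : (List (String × Int)) × (List (String × Int)) :=
  ([("x", 1), ("y", 2)], [("y", 5), ("z", 0)])
def Spec_hamming (a : List (String × Int)) (b : List (String × Int)) (out : Int) : Prop := out = hamming_alt a b
instance (a : List (String × Int)) (b : List (String × Int)) (out : Int) : Decidable (Spec_hamming a b out) := by unfold Spec_hamming; infer_instance

-- ===== CLAIM (what is proved, stated in full; the proofs are below) =====
def Claim_equal_hamming : Prop := ∀ (a : List (String × Int)) (b : List (String × Int)), Dom_hamming a b → Pre_hamming a b → Spec_hamming a b (hamming a b)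

-- ===== LEMMAS AND PROOFS =====

-- A's counting loop is the length of the filtered key list.
theorem foldl_count_eq_filter_length {α} (p : α → Bool) (l : List α) (c : Int) :
    l.foldl (fun c x => if p x then c + 1 else c) c = c + ((l.filter p).length : Int) := by
  induction l generalizing c with
  | nil => simp
  | cons x xs ih =>
    by_cases h : p x
    · simp only [List.foldl_cons, List.filter_cons, h, if_pos]
      rw [ih]; simp; ring
    · simp only [List.foldl_cons, List.filter_cons, h]
      simp [ih]

-- Two nodup lists with the same members have the same length.
theorem length_eq_of_nodup_of_mem_iff {α} (l₁ l₂ : List α) (h₁ : l₁.Nodup) (h₂ : l₂.Nodup)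
    (h : ∀ x, x ∈ l₁ ↔ x ∈ l₂) : l₁.length = l₂.length :=
  ((List.perm_ext_iff_of_nodup h₁ h₂).mpr h).length_eq

theorem filter_mem_comm_length (ka kb : List String) (ha : ka.Nodup) (hb : kb.Nodup) :
    (ka.filter (fun k => decide (k ∈ kb))).length = (kb.filter (fun k => decide (k ∈ ka))).length := by
  apply length_eq_of_nodup_of_mem_iff _ _ (ha.filter _) (hb.filter _)
  intro x
  simp [List.mem_filter, and_comm]

theorem filter_split_length {α} (l : List α) (p : α → Bool) :
    (l.filter p).length + (l.filter (fun x => !p x)).length = l.length := by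
  induction l with
  | nil => simp
  | cons x xs ih => by_cases h : p x <;> simp [h] <;> omega

theorem key_count_lemma (ka kb : List String) (ha : ka.Nodup) (hb : kb.Nodup) :
    (ka.length : Int) + kb.length - ((ka.filter (fun k => decide (k ∈ kb))).length : Int) * 2
      = ((ka.filter (fun k => !decide (k ∈ kb))).length : Int)
        + ((kb.filter (fun k => !decide (k ∈ ka))).length : Int) := by
  have h1 := filter_split_length ka (fun k => decide (k ∈ kb))
  have h2 := filter_split_length kb (fun k => decide (k ∈ ka))
  have h3 := filter_mem_comm_length ka kb ha hb
  omega

-- ===== VERDICT (by name: the statement is the Claim_ definition above) =====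
theorem hamming_spec : Claim_equal_hamming := by
  intro a b _ hpre
  obtain ⟨ha, hb⟩ := hpre
  unfold Spec_hamming hamming hamming_alt
  have hbody : (fun (c : Int) (k : String) =>
      match (PySem.Dict.mk b).get? k with
      | some _ => c + 1
      | none => c)
      = fun (c : Int) (k : String) => if decide (k ∈ b.map Prod.fst) then c + 1 else c := by
    funext c k
    rcases hget : (PySem.Dict.mk b).get? k with _ | v
    · have hnm : ¬ k ∈ b.map Prod.fst := by
        have := (PySem.Dict.get?_eq_none_iff_not_mem_keys (d := PySem.Dict.mk b) (k := k)).mp hget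
        simpa [PySem.Dict.keys] using this
      simp [hnm]
    · have hm : k ∈ b.map Prod.fst := by
        have hs : ((PySem.Dict.mk b).get? k).isSome := by simp [hget]
        rw [← PySem.Dict.contains_eq_isSome_get?] at hs
        have := (PySem.Dict.contains_iff_mem_keys (d := PySem.Dict.mk b) (k := k)).mp hs
        simpa [PySem.Dict.keys] using this
      simp [hm]
  show (a.length : Int) + (b.length : Int)
      - ((a.map Prod.fst).foldl (fun (c : Int) (k : String) =>
          match (PySem.Dict.mk b).get? k with
          | some _ => c + 1
          | none => c) 0) * 2
      = ((PySem.Set.symmDiff (PySem.Set.ofList (a.map Prod.fst))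
          (PySem.Set.ofList (b.map Prod.fst))).length : Int)
  rw [hbody, foldl_count_eq_filter_length,
    PySem.Set.ofList_eq_self_of_nodup _ ha, PySem.Set.ofList_eq_self_of_nodup _ hb]
  have hcontains : ∀ (s : List String) (k : String), PySem.Set.contains s k = decide (k ∈ s) := by
    intro s k
    simp [PySem.Set.contains]
  have hsymm : PySem.Set.symmDiff (a.map Prod.fst) (b.map Prod.fst)
      = (a.map Prod.fst).filter (fun k => !(PySem.Set.contains (b.map Prod.fst) k))
        ++ (b.map Prod.fst).filter (fun k => !(PySem.Set.contains (a.map Prod.fst) k)) := rfl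
  rw [hsymm]
  simp only [hcontains, List.length_append]
  have hkey := key_count_lemma (a.map Prod.fst) (b.map Prod.fst) ha hb
  have hla : a.length = (a.map Prod.fst).length := by simp
  have hlb : b.length = (b.map Prod.fst).length := by simp
  push_cast at hkey
  rw [hla, hlb]
  push_cast
  linarith
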